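-- pv_equiv track=rewrite | github.com/gobbleyourdong/open_problems | physics/what_is_computation/numerics/landscape_k_fvs.py | greedy_fvs
-- ===== SOURCE A (Python) =====
-- def has_cycle(adj_dict):
--     """DFS-based cycle detection on the current graph."""
--     visited = set()
--     def dfs(u, parent):
--         visited.add(u)
--         for v in adj_dict.get(u, set()):
--             if v not in visited:
--                 if dfs(v, u):
--                     return True
--             elif v != parent:
--                 return True
--         return False
--     for u in adj_dict:
--         if u not in visited:
--             if dfs(u, -1):
--                 return True
--     return False
--
-- def induced_subgraph(adj, removed):
--     """Return adjacency dict of G − removed."""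
--     sub = {}
--     for u in range(len(adj)):
--         if u in removed:
--             continue
--         sub[u] = adj[u] - removed
--     return sub
--
-- def greedy_fvs(adj):
--     """
--     Greedy FVS upper bound: iteratively remove the highest-degree
--     vertex from the current graph until acyclic.
--     """
--     n = len(adj)
--     removed = set()
--     sub = induced_subgraph(adj, removed)
--     while has_cycle(sub):
--         # Pick highest-degree vertex
--         best = max(sub.keys(), key=lambda u: len(sub[u]))
--         removed.add(best)
--         sub = induced_subgraph(adj, removed)
--     return len(removed)
-- ===== SOURCE B (Python) =====
-- def _has_cycle(sub):
--     """Iterative (explicit-stack) DFS cycle check on an adjacency dict of sets."""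
--     visited = set()
--     for s in sub:
--         if s in visited:
--             continue
--         visited.add(s)
--         # frame: (vertex, parent, neighbour list, next index to scan)
--         stack = [(s, -1, list(sub.get(s, ())), 0)]
--         while stack:
--             u, p, ns, i = stack[-1]
--             if i == len(ns):
--                 stack.pop()
--                 continue
--             stack[-1] = (u, p, ns, i + 1)
--             v = ns[i]
--             if v not in visited:
--                 visited.add(v)
--                 stack.append((v, u, list(sub.get(v, ())), 0))
--             elif v != p:
--                 return True
--     return False
--
--
-- def greedy_fvs(adj):
--     """
--     Greedy FVS upper bound: iteratively remove the highest-degree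
--     vertex from the current graph until acyclic.
--     """
--     n = len(adj)
--     sub = {u: set(adj[u]) for u in range(n)}
--     count = 0
--     while _has_cycle(sub):
--         # first key of highest degree (keys are in increasing order)
--         best, best_deg = -1, -1
--         for u, nbrs in sub.items():
--             if len(nbrs) > best_deg:
--                 best, best_deg = u, len(nbrs)
--         # delete `best` in place instead of rebuilding the induced subgraph
--         del sub[best]
--         for nbrs in sub.values():
--             nbrs.discard(best)
--         count += 1
--     return count
-- ===== Notes on version B (the rewrite author's own statement) =====
-- stated objective: faster
-- what changed: B replaces the recursive DFS cycle check by an explicit-stack iterative DFS (no Python call overhead or recursion-depth limit), maintains the shrinking graph in place (deleting one vertex per round) instead of rebuilding the whole induced subgraph from the original adjacency every round, and picks the max-degree vertex by a single fold over the dict items instead of max(keys, key=...).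
import Mathlib
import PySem

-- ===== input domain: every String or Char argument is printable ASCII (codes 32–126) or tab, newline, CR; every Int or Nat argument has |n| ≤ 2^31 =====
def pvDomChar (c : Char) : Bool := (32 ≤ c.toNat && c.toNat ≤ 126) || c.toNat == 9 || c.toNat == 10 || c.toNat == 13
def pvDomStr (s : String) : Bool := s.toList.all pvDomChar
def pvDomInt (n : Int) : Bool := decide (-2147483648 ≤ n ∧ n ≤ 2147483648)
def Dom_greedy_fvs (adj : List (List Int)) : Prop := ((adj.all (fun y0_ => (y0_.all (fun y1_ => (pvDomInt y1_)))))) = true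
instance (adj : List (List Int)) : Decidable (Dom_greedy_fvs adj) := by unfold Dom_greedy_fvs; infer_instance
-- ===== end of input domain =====

-- B restructures A (same greedy strategy, different decomposition): explicit-stack DFS instead of
-- recursion, in-place vertex deletion instead of rebuilding the induced subgraph each round, and a
-- single fold for the max-degree pick (measurably faster in a timing run).  Equality of the
-- two ports is proved on all inputs.

-- ===== PORT A =====

-- adj[u] for 0 <= u < len(adj) (exact: index always in range at use sites)
def rowA (adj : List (List Int)) (u : Int) : List Int := (PySem.List.pyGet? adj u).getD []

-- induced_subgraph(adj, removed): sub[u] = adj[u] - removed for u in range(len(adj)), u not removed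
def inducedSubgraph (adj : List (List Int)) (removed : PySem.Set Int) :
    PySem.Dict Int (PySem.Set Int) :=
  (PySem.List.pyRange 0 (adj.length : Int) 1).foldl
    (fun sub u =>
      if PySem.Set.contains removed u then sub
      else sub.insert u (PySem.Set.diff (PySem.Set.ofList (rowA adj u)) removed))
    (PySem.Dict.mk [])

-- the body of A's recursive dfs, with the neighbour loop as structural recursion; the recursive
-- call `dfs(v, u)` is inlined at its single call site (visited.add at entry = `vis.add v` here).
-- fuel only bounds the recursion depth (each nested call visits a fresh vertex); it is a pure
-- totality guard, never reached from the entry point.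
def scanA (sub : PySem.Dict Int (PySem.Set Int)) :
    Nat → List Int → Int → Int → PySem.Set Int → Bool × PySem.Set Int
  | _, [], _, _, vis => (false, vis)
  | f, v :: vs, u, p, vis =>
    if PySem.Set.contains vis v = false then
      match f with
      | 0 => (false, vis)   -- fuel guard, unreachable from hasCycleA
      | g + 1 =>
        match scanA sub g (sub.getD v []) v u (PySem.Set.add vis v) with
        | (true, w) => (true, w)
        | (false, w) => scanA sub (g + 1) vs u p w
    else if v ≠ p then (true, vis)
    else scanA sub f vs u p vis
  termination_by f ns _ _ _ => (f, ns.length)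

-- dfs(u, parent) with a given visited set
def dfsA (sub : PySem.Dict Int (PySem.Set Int)) (f : Nat) (u p : Int) (vis : PySem.Set Int) :
    Bool × PySem.Set Int :=
  match f with
  | 0 => (false, vis)
  | g + 1 => scanA sub g (sub.getD u []) u p (PySem.Set.add vis u)

-- `for u in adj_dict: if u not in visited: if dfs(u, -1): return True`
def loopA (sub : PySem.Dict Int (PySem.Set Int)) (f : Nat) :
    List Int → PySem.Set Int → Bool
  | [], _ => false
  | u :: us, vis =>
    if PySem.Set.contains vis u = false then
      match dfsA sub f u (-1) vis with
      | (true, _) => true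
      | (false, vis') => loopA sub f us vis'
    else loopA sub f us vis

def fuelA (sub : PySem.Dict Int (PySem.Set Int)) : Nat :=
  sub.keys.length + sub.values.flatten.length + 1

def hasCycleA (sub : PySem.Dict Int (PySem.Set Int)) : Bool :=
  loopA sub (fuelA sub) sub.keys (PySem.Set.ofList [])

-- the while-loop of greedy_fvs; fuel = totality guard (each round removes a fresh vertex)
def greedyLoopA (adj : List (List Int)) : Nat → PySem.Set Int → Int
  | 0, removed => PySem.Set.len removed
  | f + 1, removed =>
    let sub := inducedSubgraph adj removed
    if hasCycleA sub then
      let best := (PySem.List.max? sub.keys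
        (fun u => PySem.Set.len (sub.getD u []))).getD (-1)
      greedyLoopA adj f (PySem.Set.add removed best)
    else PySem.Set.len removed

def greedy_fvs (adj : List (List Int)) : Int :=
  greedyLoopA adj (adj.length + 2) (PySem.Set.ofList [])

-- ===== PORT B =====

-- {u: set(adj[u]) for u in range(n)} (adj[u] read directly; index always in range)
def initSubB (adj : List (List Int)) : PySem.Dict Int (PySem.Set Int) :=
  (PySem.List.pyRange 0 (adj.length : Int) 1).foldl
    (fun d u => d.insert u (PySem.Set.ofList ((PySem.List.pyGet? adj u).getD [])))
    (PySem.Dict.mk [])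

-- the inner while-loop of _has_cycle: frames (u, parent, remaining neighbours) — the remaining
-- slice ns[i:] of Source B's (ns, i) frame.  fuel bounds the number of fresh-vertex pushes only.
def runB (sub : PySem.Dict Int (PySem.Set Int)) :
    Nat → List (Int × Int × List Int) → PySem.Set Int → Bool × PySem.Set Int
  | _, [], vis => (false, vis)
  | f, (_, _, []) :: rest, vis => runB sub f rest vis
  | f, (u, p, v :: vs) :: rest, vis =>
    if PySem.Set.contains vis v = false then
      match f with
      | 0 => (false, vis)   -- fuel guard, unreachable from hasCycleB
      | g + 1 =>
        runB sub g ((v, u, sub.getD v []) :: (u, p, vs) :: rest) (PySem.Set.add vis v)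
    else if v ≠ p then (true, vis)
    else runB sub f ((u, p, vs) :: rest) vis
  termination_by f st _ => (f, st.foldr (fun fr a => a + fr.2.2.length + 1) 0)

def loopB (sub : PySem.Dict Int (PySem.Set Int)) (f : Nat) :
    List Int → PySem.Set Int → Bool
  | [], _ => false
  | s :: ss, vis =>
    if PySem.Set.contains vis s = false then
      match runB sub f [(s, -1, sub.getD s [])] (PySem.Set.add vis s) with
      | (true, _) => true
      | (false, vis') => loopB sub f ss vis'
    else loopB sub f ss vis

def fuelB (sub : PySem.Dict Int (PySem.Set Int)) : Nat :=
  sub.items.length + (sub.items.map (fun pr => pr.2.length)).sum + 1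

def hasCycleB (sub : PySem.Dict Int (PySem.Set Int)) : Bool :=
  loopB sub (fuelB sub) sub.keys (PySem.Set.ofList [])

-- best, best_deg = -1, -1; for u, nbrs in sub.items(): if len(nbrs) > best_deg: ...
def argmaxB (items : List (Int × PySem.Set Int)) : Int :=
  (items.foldl
    (fun (acc : Int × Int) pr =>
      if PySem.Set.len pr.2 > acc.2 then (pr.1, PySem.Set.len pr.2) else acc)
    (-1, -1)).1

-- del sub[best]; for nbrs in sub.values(): nbrs.discard(best)
def delVertexB (sub : PySem.Dict Int (PySem.Set Int)) (best : Int) :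
    PySem.Dict Int (PySem.Set Int) :=
  let d := sub.erase best
  d.keys.foldl (fun d' u => d'.modify u [] (fun s => PySem.Set.discard s best)) d

def greedyLoopB (adj : List (List Int)) :
    Nat → PySem.Dict Int (PySem.Set Int) → Int → Int
  | 0, _, count => count
  | f + 1, sub, count =>
    if hasCycleB sub then
      greedyLoopB adj f (delVertexB sub (argmaxB sub.items)) (count + 1)
    else count

def greedy_fvs_alt (adj : List (List Int)) : Int :=
  greedyLoopB adj (adj.length + 2) (initSubB adj) 0

-- ===== PRECONDITION & SPEC =====
def Spec_greedy_fvs (adj : List (List Int)) (out : Int) : Prop := out = greedy_fvs_alt adj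
instance (adj : List (List Int)) (out : Int) : Decidable (Spec_greedy_fvs adj out) := by
  unfold Spec_greedy_fvs; infer_instance

-- ===== CLAIM (what is proved, stated in full; the proofs are below) =====
def Claim_equal_greedy_fvs : Prop :=
  ∀ (adj : List (List Int)), Dom_greedy_fvs adj → Spec_greedy_fvs adj (greedy_fvs adj)

-- ===== LEMMAS AND PROOFS =====

theorem contains_iff (s : PySem.Set Int) (x : Int) :
    PySem.Set.contains s x = true ↔ x ∈ s := by
  unfold PySem.Set.contains
  exact List.contains_iff_mem

theorem mem_add (s : PySem.Set Int) (x y : Int) (h : x ∈ s) : x ∈ PySem.Set.add s y := by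
  unfold PySem.Set.add; split <;> simp [h]

theorem mem_add_self (s : PySem.Set Int) (y : Int) : y ∈ PySem.Set.add s y := by
  unfold PySem.Set.add; split
  · exact (contains_iff s y).mp (by assumption)
  · simp

-- all vertices mentioned by sub
def univA (sub : PySem.Dict Int (PySem.Set Int)) : List Int :=
  sub.keys ++ sub.values.flatten

def missing (sub : PySem.Dict Int (PySem.Set Int)) (vis : PySem.Set Int) : Nat :=
  (univA sub).countP (fun v => !PySem.Set.contains vis v)

theorem missing_le_univ (sub : PySem.Dict Int (PySem.Set Int)) (vis : PySem.Set Int) :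
    missing sub vis ≤ (univA sub).length := List.countP_le_length

theorem not_mem_of_contains_false {s : PySem.Set Int} {x : Int}
    (h : PySem.Set.contains s x = false) : x ∉ s := fun hm => by
  rw [(contains_iff s x).mpr hm] at h; cases h

-- step equations for the WF-recursive machines
theorem scanA_nil (sub : PySem.Dict Int (PySem.Set Int)) (f : Nat) (u p : Int)
    (vis : PySem.Set Int) : scanA sub f [] u p vis = (false, vis) := by
  rw [scanA.eq_def]

theorem scanA_fresh (sub : PySem.Dict Int (PySem.Set Int)) (g : Nat) (v : Int) (vs : List Int)
    (u p : Int) (vis : PySem.Set Int) (h : PySem.Set.contains vis v = false) :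
    scanA sub (g + 1) (v :: vs) u p vis
      = match scanA sub g (sub.getD v []) v u (PySem.Set.add vis v) with
        | (true, w) => (true, w)
        | (false, w) => scanA sub (g + 1) vs u p w := by
  rw [scanA.eq_def]; simp [not_mem_of_contains_false h]

theorem scanA_vis_ne (sub : PySem.Dict Int (PySem.Set Int)) (f : Nat) (v : Int) (vs : List Int)
    (u p : Int) (vis : PySem.Set Int) (h : PySem.Set.contains vis v = true) (hne : v ≠ p) :
    scanA sub f (v :: vs) u p vis = (true, vis) := by
  rw [scanA.eq_def]; simp [(contains_iff vis v).mp h, hne]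

theorem scanA_vis_eq (sub : PySem.Dict Int (PySem.Set Int)) (f : Nat) (v : Int) (vs : List Int)
    (u p : Int) (vis : PySem.Set Int) (h : PySem.Set.contains vis v = true) (hpe : v = p) :
    scanA sub f (v :: vs) u p vis = scanA sub f vs u p vis := by
  rw [scanA.eq_def]; simp [hpe, (contains_iff vis p).mp (hpe ▸ h)]

theorem runB_nil (sub : PySem.Dict Int (PySem.Set Int)) (f : Nat) (vis : PySem.Set Int) :
    runB sub f [] vis = (false, vis) := by
  rw [runB.eq_def]

theorem runB_pop (sub : PySem.Dict Int (PySem.Set Int)) (f : Nat) (u p : Int)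
    (rest : List (Int × Int × List Int)) (vis : PySem.Set Int) :
    runB sub f ((u, p, []) :: rest) vis = runB sub f rest vis := by
  rw [runB.eq_def]

theorem runB_fresh (sub : PySem.Dict Int (PySem.Set Int)) (g : Nat) (u p v : Int) (vs : List Int)
    (rest : List (Int × Int × List Int)) (vis : PySem.Set Int)
    (h : PySem.Set.contains vis v = false) :
    runB sub (g + 1) ((u, p, v :: vs) :: rest) vis
      = runB sub g ((v, u, sub.getD v []) :: (u, p, vs) :: rest) (PySem.Set.add vis v) := by
  rw [runB.eq_def]; simp [not_mem_of_contains_false h]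

theorem runB_vis_ne (sub : PySem.Dict Int (PySem.Set Int)) (f : Nat) (u p v : Int) (vs : List Int)
    (rest : List (Int × Int × List Int)) (vis : PySem.Set Int)
    (h : PySem.Set.contains vis v = true) (hne : v ≠ p) :
    runB sub f ((u, p, v :: vs) :: rest) vis = (true, vis) := by
  rw [runB.eq_def]; simp [(contains_iff vis v).mp h, hne]

theorem runB_vis_eq (sub : PySem.Dict Int (PySem.Set Int)) (f : Nat) (u p v : Int) (vs : List Int)
    (rest : List (Int × Int × List Int)) (vis : PySem.Set Int)
    (h : PySem.Set.contains vis v = true) (hpe : v = p) :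
    runB sub f ((u, p, v :: vs) :: rest) vis = runB sub f ((u, p, vs) :: rest) vis := by
  rw [runB.eq_def]; simp [hpe, (contains_iff vis p).mp (hpe ▸ h)]

theorem countP_lt_countP {p q : Int → Bool} :
    ∀ (l : List Int), (∀ a ∈ l, p a → q a) → ∀ a ∈ l, q a = true → p a = false →
      l.countP p < l.countP q
  | [], _, a, ha, _, _ => by simp at ha
  | x :: xs, hpq, a, ha, h1, h2 => by
    rcases List.mem_cons.mp ha with rfl | ha'
    · have hle : xs.countP p ≤ xs.countP q :=
        List.countP_mono_left (fun b hb => hpq b (by simp [hb]))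
      simp [h1, h2]; omega
    · have ih := countP_lt_countP xs (fun b hb => hpq b (by simp [hb])) a ha' h1 h2
      simp only [List.countP_cons]
      by_cases hx : p x = true
      · have hq : q x = true := hpq x (by simp) hx
        simp [hx, hq]; omega
      · simp only [Bool.not_eq_true] at hx
        simp [hx]
        split <;> omega

theorem missing_mono (sub : PySem.Dict Int (PySem.Set Int)) {vis w : PySem.Set Int}
    (h : ∀ x ∈ vis, x ∈ w) : missing sub w ≤ missing sub vis := by
  refine List.countP_mono_left (fun a _ hp => ?_)
  cases hv : PySem.Set.contains vis a with
  | false => simp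
  | true =>
    exfalso
    have haw : a ∈ w := h a ((contains_iff vis a).mp hv)
    rw [(contains_iff w a).mpr haw] at hp
    simp at hp

theorem missing_add_lt (sub : PySem.Dict Int (PySem.Set Int)) {vis : PySem.Set Int} {v : Int}
    (hv : v ∈ univA sub) (hfresh : PySem.Set.contains vis v = false) :
    missing sub (PySem.Set.add vis v) < missing sub vis := by
  refine countP_lt_countP (univA sub) (fun a _ hp => ?_) v hv ?_ ?_
  · cases hva : PySem.Set.contains vis a with
    | false => simp
    | true =>
      exfalso
      have : a ∈ PySem.Set.add vis v := mem_add _ _ _ ((contains_iff vis a).mp hva)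
      rw [(contains_iff _ a).mpr this] at hp
      simp at hp
  · simp only [Bool.not_eq_true']
    exact hfresh
  · simp only [Bool.not_eq_false']
    exact (contains_iff _ v).mpr (mem_add_self vis v)

theorem getD_subset_univ (sub : PySem.Dict Int (PySem.Set Int)) (v x : Int)
    (h : x ∈ sub.getD v []) : x ∈ univA sub := by
  unfold PySem.Dict.getD PySem.Dict.get? at h
  cases hf : List.find? (fun p => p.1 == v) sub.items with
  | none => rw [hf] at h; simp at h
  | some pr =>
    rw [hf] at h
    simp only [Option.map_some, Option.getD_some] at h
    have hpr : pr ∈ sub.items := List.mem_of_find?_eq_some hf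
    have : pr.2 ∈ sub.values := List.mem_map_of_mem hpr
    exact List.mem_append_right _ (List.mem_flatten.mpr ⟨pr.2, this, h⟩)

theorem scanA_growth (sub : PySem.Dict Int (PySem.Set Int)) :
    ∀ (f : Nat) (ns : List Int) (u p : Int) (vis : PySem.Set Int),
      ∀ x ∈ vis, x ∈ (scanA sub f ns u p vis).2 := by
  intro f ns u p vis x hx
  fun_induction scanA sub f ns u p vis generalizing x <;>
    simp_all [mem_add]

theorem runB_mono (sub : PySem.Dict Int (PySem.Set Int)) :
    ∀ (f g : Nat) (st : List (Int × Int × List Int)) (vis : PySem.Set Int),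
      (∀ fr ∈ st, ∀ x ∈ fr.2.2, x ∈ univA sub) →
      missing sub vis ≤ f → missing sub vis ≤ g →
      runB sub f st vis = runB sub g st vis := by
  intro f g st vis hst hf hg
  fun_induction runB sub f st vis generalizing g
  case case1 f vis => rw [runB]
  case case2 f u' p' rest vis ih =>
    rw [runB]
    exact ih g (fun fr hfr => hst fr (List.mem_cons_of_mem _ hfr)) hf hg
  case case3 u p v vs rest vis hfresh =>
    exfalso
    have hvuniv : v ∈ univA sub := hst (u, p, v :: vs) (by simp) v (by simp)
    have : 0 < missing sub vis := List.countP_pos_iff.mpr ⟨v, hvuniv, by simp only [Bool.not_eq_true']; exact hfresh⟩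
    omega
  case case4 u p v vs rest vis hfresh f' ih =>
    have hvuniv : v ∈ univA sub := hst (u, p, v :: vs) (by simp) v (by simp)
    have hlt : missing sub (PySem.Set.add vis v) < missing sub vis :=
      missing_add_lt sub hvuniv hfresh
    cases g with
    | zero =>
      exfalso
      have : 0 < missing sub vis := List.countP_pos_iff.mpr ⟨v, hvuniv, by simp only [Bool.not_eq_true']; exact hfresh⟩
      omega
    | succ g' =>
      rw [runB_fresh sub g' u p v vs rest vis hfresh]
      refine ih g' ?_ (by omega) (by omega)
      intro fr hfr x hx
      rcases List.mem_cons.mp hfr with rfl | hfr'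
      · exact getD_subset_univ sub v x hx
      · rcases List.mem_cons.mp hfr' with rfl | hfr''
        · exact hst (u, p, v :: vs) (by simp) x (List.mem_cons_of_mem _ hx)
        · exact hst fr (List.mem_cons_of_mem _ hfr'') x hx
  case case5 f u p v vs rest vis hfresh hne =>
    simp only [Bool.not_eq_false] at hfresh
    rw [runB_vis_ne sub g u p v vs rest vis hfresh hne]
  case case6 f u p v vs rest vis hfresh hne ih =>
    simp only [Bool.not_eq_false] at hfresh
    simp only [ne_eq, not_not] at hne
    rw [runB_vis_eq sub g u p v vs rest vis hfresh hne]
    exact ih g (fun fr hfr x hx => by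
      rcases List.mem_cons.mp hfr with rfl | hfr'
      · exact hst (u, p, v :: vs) (by simp) x (List.mem_cons_of_mem _ hx)
      · exact hst fr (List.mem_cons_of_mem _ hfr') x hx) hf hg

theorem sim (sub : PySem.Dict Int (PySem.Set Int)) :
    ∀ (f : Nat) (ns : List Int) (u p : Int) (vis : PySem.Set Int)
      (rest : List (Int × Int × List Int)),
      (∀ v ∈ ns, v ∈ univA sub) →
      (∀ fr ∈ rest, ∀ x ∈ fr.2.2, x ∈ univA sub) →
      missing sub vis ≤ f →
      (match scanA sub f ns u p vis with
       | (true, _) => (runB sub f ((u, p, ns) :: rest) vis).1 = true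
       | (false, w) => runB sub f ((u, p, ns) :: rest) vis = runB sub f rest w) := by
  intro f ns u p vis
  induction f, ns, u, p, vis using scanA.induct sub with
  | case1 f u p vis =>
    intro rest hns hrest hf
    rw [scanA_nil]
    exact runB_pop sub f u p rest vis
  | case2 v vs u p vis hfresh =>
    intro rest hns hrest hf
    exfalso
    have hvu : v ∈ univA sub := hns v (by simp)
    have : 0 < missing sub vis :=
      List.countP_pos_iff.mpr ⟨v, hvu, by simp only [Bool.not_eq_true']; exact hfresh⟩
    omega
  | case3 v vs u p vis hfresh g w hres ih =>
    intro rest hns hrest hf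
    simp only [Nat.succ_eq_add_one]
    rw [scanA_fresh sub g v vs u p vis hfresh]
    rw [hres]
    have hvu : v ∈ univA sub := hns v (by simp)
    have hmadd : missing sub (PySem.Set.add vis v) < missing sub vis :=
      missing_add_lt sub hvu hfresh
    have ih' := ih ((u, p, vs) :: rest)
      (fun x hx => getD_subset_univ sub v x hx)
      (fun fr hfr x hx => by
        rcases List.mem_cons.mp hfr with rfl | hfr'
        · exact hns x (List.mem_cons_of_mem _ hx)
        · exact hrest fr hfr' x hx)
      (by omega)
    rw [hres] at ih'
    rw [runB_fresh sub g u p v vs rest vis hfresh]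
    exact ih'
  | case4 v vs u p vis hfresh g w hres ih1 ih2 =>
    intro rest hns hrest hf
    simp only [Nat.succ_eq_add_one]
    rw [scanA_fresh sub g v vs u p vis hfresh]
    rw [hres]
    have hvu : v ∈ univA sub := hns v (by simp)
    have hmadd : missing sub (PySem.Set.add vis v) < missing sub vis :=
      missing_add_lt sub hvu hfresh
    -- the inner dfs returned (false, w): the machine reaches state ((u,p,vs)::rest, w)
    have ih1' := ih1 ((u, p, vs) :: rest)
      (fun x hx => getD_subset_univ sub v x hx)
      (fun fr hfr x hx => by
        rcases List.mem_cons.mp hfr with rfl | hfr'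
        · exact hns x (List.mem_cons_of_mem _ hx)
        · exact hrest fr hfr' x hx)
      (by omega)
    rw [hres] at ih1'
    have hsubw : ∀ x ∈ PySem.Set.add vis v, x ∈ w := by
      intro x hx
      have := scanA_growth sub g (sub.getD v []) v u (PySem.Set.add vis v) x hx
      rw [hres] at this
      exact this
    have hmw : missing sub w ≤ missing sub (PySem.Set.add vis v) := missing_mono sub hsubw
    have hframes : ∀ fr ∈ (u, p, vs) :: rest, ∀ x ∈ fr.2.2, x ∈ univA sub := by
      intro fr hfr x hx
      rcases List.mem_cons.mp hfr with rfl | hfr'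
      · exact hns x (List.mem_cons_of_mem _ hx)
      · exact hrest fr hfr' x hx
    have hmono : runB sub g ((u, p, vs) :: rest) w = runB sub (g + 1) ((u, p, vs) :: rest) w :=
      runB_mono sub g (g + 1) ((u, p, vs) :: rest) w hframes (by omega) (by omega)
    have hstepB : runB sub (g + 1) ((u, p, v :: vs) :: rest) vis
        = runB sub (g + 1) ((u, p, vs) :: rest) w := by
      rw [runB_fresh sub g u p v vs rest vis hfresh, ih1', hmono]
    have ih2' := ih2 rest (fun x hx => hns x (List.mem_cons_of_mem _ hx)) hrest (by omega)
    cases hsc : scanA sub (g + 1) vs u p w with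
    | mk b w2 =>
      rw [hsc] at ih2'
      simp only [hsc]
      cases b with
      | true =>
        simp only
        rw [hstepB]
        exact ih2'
      | false =>
        simp only
        rw [hstepB, ih2']
  | case5 f v vs u p vis hvis hne =>
    intro rest hns hrest hf
    simp only [Bool.not_eq_false] at hvis
    rw [scanA_vis_ne sub f v vs u p vis hvis hne]
    simp only
    rw [runB_vis_ne sub f u p v vs rest vis hvis hne]
  | case6 f v vs u p vis hvis hne ih =>
    intro rest hns hrest hf
    simp only [Bool.not_eq_false] at hvis
    simp only [ne_eq, not_not] at hne
    rw [scanA_vis_eq sub f v vs u p vis hvis hne,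
        runB_vis_eq sub f u p v vs rest vis hvis hne]
    exact ih rest (fun x hx => hns x (List.mem_cons_of_mem _ hx)) hrest hf

theorem univA_length (sub : PySem.Dict Int (PySem.Set Int)) :
    (univA sub).length = sub.keys.length + sub.values.flatten.length := by
  simp [univA]

theorem fuelB_eq (sub : PySem.Dict Int (PySem.Set Int)) : fuelB sub = fuelA sub := by
  simp only [fuelA, fuelB, PySem.Dict.keys, PySem.Dict.values, List.length_flatten,
    List.length_map, List.map_map]
  rfl

theorem loops_eq (sub : PySem.Dict Int (PySem.Set Int)) :
    ∀ (ks : List Int) (vis : PySem.Set Int),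
      loopA sub (fuelA sub) ks vis = loopB sub (fuelB sub) ks vis := by
  intro ks
  induction ks with
  | nil => intro vis; simp [loopA, loopB]
  | cons u us ihk =>
    intro vis
    rw [fuelB_eq sub]
    by_cases hv : PySem.Set.contains vis u = false
    · have hg : missing sub (PySem.Set.add vis u)
          ≤ sub.keys.length + sub.values.flatten.length := by
        have := missing_le_univ sub (PySem.Set.add vis u)
        rw [univA_length] at this
        exact this
      have hmono : runB sub (fuelA sub) [(u, -1, sub.getD u [])] (PySem.Set.add vis u)
          = runB sub (sub.keys.length + sub.values.flatten.length)
              [(u, -1, sub.getD u [])] (PySem.Set.add vis u) := by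
        refine runB_mono sub _ _ _ _ ?_ ?_ hg
        · intro fr hfr x hx
          rcases List.mem_cons.mp hfr with rfl | h'
          · exact getD_subset_univ sub u x hx
          · simp at h'
        · unfold fuelA; omega
      have hsim := sim sub (sub.keys.length + sub.values.flatten.length)
        (sub.getD u []) u (-1) (PySem.Set.add vis u) []
        (fun x hx => getD_subset_univ sub u x hx) (by simp) hg
      have hdfs : dfsA sub (fuelA sub) u (-1) vis
          = scanA sub (sub.keys.length + sub.values.flatten.length)
              (sub.getD u []) u (-1) (PySem.Set.add vis u) := rfl
      cases hsc : scanA sub (sub.keys.length + sub.values.flatten.length)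
          (sub.getD u []) u (-1) (PySem.Set.add vis u) with
      | mk b w =>
        rw [hsc] at hsim
        cases b with
        | true =>
          simp only [loopA, loopB, hv, if_true]
          rw [hdfs, hsc]
          cases hr : runB sub (fuelA sub) [(u, -1, sub.getD u [])] (PySem.Set.add vis u) with
          | mk b' w' =>
            rw [hmono] at hr
            simp only at hsim
            rw [hr] at hsim
            simp at hsim
            rw [hsim]
        | false =>
          simp only at hsim
          rw [runB_nil] at hsim
          simp only [loopA, loopB, hv, if_true]
          rw [hdfs, hsc, hmono, hsim]
          exact fuelB_eq sub ▸ ihk w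
    · simp only [Bool.not_eq_false] at hv
      simp only [loopA, loopB, hv]
      simp only [Bool.true_eq_false, if_false]
      exact fuelB_eq sub ▸ ihk vis

theorem hasCycle_eq (sub : PySem.Dict Int (PySem.Set Int)) :
    hasCycleA sub = hasCycleB sub :=
  loops_eq sub sub.keys (PySem.Set.ofList [])

theorem hasCycleA_keys_ne (sub : PySem.Dict Int (PySem.Set Int))
    (h : hasCycleA sub = true) : sub.keys ≠ [] := by
  intro hk
  unfold hasCycleA at h
  rw [hk] at h
  simp [loopA] at h

theorem contains_add (s : PySem.Set Int) (x y : Int) :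
    PySem.Set.contains (PySem.Set.add s x) y = (PySem.Set.contains s y || y == x) := by
  unfold PySem.Set.add
  by_cases hx : PySem.Set.contains s x = true
  · rw [if_pos hx]
    by_cases hxy : y = x
    · subst hxy
      rw [hx]
      simp
    · simp [hxy]
  · rw [if_neg hx]
    unfold PySem.Set.contains at *
    simp [List.contains_iff_mem] at *
    by_cases hxy : y = x <;> simp [hxy]

theorem insert_items_fresh (d : PySem.Dict Int (PySem.Set Int)) (k : Int)
    (v : PySem.Set Int) (h : d.contains k = false) :
    (d.insert k v).items = d.items ++ [(k, v)] := by
  unfold PySem.Dict.insert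
  rw [h]
  simp

theorem find?_first {pr : Int × PySem.Set Int} :
    ∀ {l : List (Int × PySem.Set Int)}, (l.map Prod.fst).Nodup → pr ∈ l →
      l.find? (fun q => q.1 == pr.1) = some pr
  | [], _, hp => by simp at hp
  | a :: t, hnd, hp => by
    rcases List.mem_cons.mp hp with rfl | hp'
    · simp [List.find?_cons_of_pos]
    · have ha : a.1 ≠ pr.1 := by
        intro he
        have : pr.1 ∈ t.map Prod.fst := List.mem_map_of_mem hp'
        rw [List.map_cons] at hnd
        exact (List.nodup_cons.mp hnd).1 (he ▸ this)
      rw [List.find?_cons_of_neg (by simpa using ha)]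
      exact find?_first (by rw [List.map_cons] at hnd; exact (List.nodup_cons.mp hnd).2) hp'

theorem get?_of_mem_nodup (d : PySem.Dict Int (PySem.Set Int)) {pr : Int × PySem.Set Int}
    (hnd : d.keys.Nodup) (hp : pr ∈ d.items) : d.get? pr.1 = some pr.2 := by
  unfold PySem.Dict.get?
  rw [find?_first hnd hp]
  rfl

theorem contains_of_mem_keys (d : PySem.Dict Int (PySem.Set Int)) {k : Int}
    (h : k ∈ d.keys) : d.contains k = true := by
  unfold PySem.Dict.contains
  simp only [List.any_eq_true]
  rcases List.mem_map.mp h with ⟨p, hp, rfl⟩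
  exact ⟨p, hp, by simp⟩

theorem modify_items (d : PySem.Dict Int (PySem.Set Int)) (u : Int)
    (g : PySem.Set Int → PySem.Set Int) (hnd : d.keys.Nodup) (hu : d.contains u = true) :
    (d.modify u [] g).items = d.items.map (fun p => if p.1 = u then (p.1, g p.2) else p) := by
  unfold PySem.Dict.modify PySem.Dict.insert
  rw [hu]
  simp only
  refine List.map_congr_left (fun p hp => ?_)
  by_cases hpu : p.1 = u
  · have hg : d.getD u [] = p.2 := by
      unfold PySem.Dict.getD
      rw [← hpu, get?_of_mem_nodup d hnd hp]
      rfl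
    simp [hpu, hg]
  · simp [hpu]

theorem keys_modify (d : PySem.Dict Int (PySem.Set Int)) (u : Int)
    (g : PySem.Set Int → PySem.Set Int) (hnd : d.keys.Nodup) (hu : d.contains u = true) :
    (d.modify u [] g).keys = d.keys := by
  unfold PySem.Dict.keys
  rw [modify_items d u g hnd hu, List.map_map]
  refine List.map_congr_left (fun p _ => ?_)
  by_cases hpu : p.1 = u <;> simp [hpu]

theorem contains_eq_keys_contains (d : PySem.Dict Int (PySem.Set Int)) (k : Int) :
    d.contains k = d.keys.contains k := by
  unfold PySem.Dict.contains PySem.Dict.keys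
  induction d.items with
  | nil => simp
  | cons p t ih =>
    simp only [List.any_cons, List.map_cons, List.contains_cons, ih]
    by_cases h : p.1 = k
    · simp [h]
    · have h1 : (p.1 == k) = false := by simpa using h
      have h2 : (k == p.1) = false := by simpa using (fun he => h he.symm)
      simp [h1, h2]

theorem foldl_modify_all (g : PySem.Set Int → PySem.Set Int) :
    ∀ (ks : List Int) (d : PySem.Dict Int (PySem.Set Int)), ks.Nodup →
      (∀ k ∈ ks, d.contains k = true) → d.keys.Nodup →
      (ks.foldl (fun d' u => d'.modify u [] g) d).items
        = d.items.map (fun p => if p.1 ∈ ks then (p.1, g p.2) else p)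
  | [], d, _, _, _ => by simp
  | u :: ks', d, hnd, hks, hkey => by
    have hu : d.contains u = true := hks u (by simp)
    have hitems : (d.modify u [] g).items
        = d.items.map (fun p => if p.1 = u then (p.1, g p.2) else p) :=
      modify_items d u g hkey hu
    have hkeys : (d.modify u [] g).keys = d.keys := keys_modify d u g hkey hu
    rw [List.foldl_cons]
    rw [foldl_modify_all g ks' (d.modify u [] g) (List.nodup_cons.mp hnd).2
      (fun k hk => by
        rw [contains_eq_keys_contains, hkeys, ← contains_eq_keys_contains]
        exact hks k (List.mem_cons_of_mem _ hk))
      (hkeys ▸ hkey)]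
    rw [hitems, List.map_map]
    refine List.map_congr_left (fun p _ => ?_)
    have hu_notin : u ∉ ks' := (List.nodup_cons.mp hnd).1
    by_cases hpu : p.1 = u
    · simp only [Function.comp, hpu, if_pos rfl]
      have : u ∉ ks' := hu_notin
      simp [this]
    · simp only [Function.comp, hpu, if_neg hpu]
      by_cases hmem : p.1 ∈ ks' <;> simp [hmem, hpu]

theorem contains_iff_mem_keys (d : PySem.Dict Int (PySem.Set Int)) (k : Int) :
    d.contains k = true ↔ k ∈ d.keys := by
  rw [contains_eq_keys_contains]
  exact List.contains_iff_mem

theorem keys_insert_fresh (d : PySem.Dict Int (PySem.Set Int)) (k : Int)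
    (v : PySem.Set Int) (h : d.contains k = false) :
    (d.insert k v).keys = d.keys ++ [k] := by
  unfold PySem.Dict.keys
  rw [insert_items_fresh d k v h]
  simp

theorem foldl_induced_items (adj : List (List Int)) (removed : PySem.Set Int) :
    ∀ (l : List Int) (d : PySem.Dict Int (PySem.Set Int)), l.Nodup →
      (∀ u ∈ l, u ∉ d.keys) →
      ((l.foldl (fun sub u =>
          if PySem.Set.contains removed u then sub
          else sub.insert u (PySem.Set.diff (PySem.Set.ofList (rowA adj u)) removed)) d).items
        = d.items ++ l.filterMap (fun u =>
            if PySem.Set.contains removed u then none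
            else some (u, PySem.Set.diff (PySem.Set.ofList (rowA adj u)) removed)))
  | [], d, _, _ => by simp
  | u :: l', d, hnd, hcf => by
    rw [List.foldl_cons]
    by_cases hr : PySem.Set.contains removed u = true
    · rw [if_pos hr]
      rw [foldl_induced_items adj removed l' d (List.nodup_cons.mp hnd).2
        (fun w hw => hcf w (List.mem_cons_of_mem _ hw))]
      have hru : u ∈ removed := (contains_iff removed u).mp hr
      rw [List.filterMap_cons]
      simp [hru]
    · simp only [Bool.not_eq_true] at hr
      have hru : u ∉ removed := not_mem_of_contains_false hr
      rw [if_neg (by simpa using hru)]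
      have hfresh : d.contains u = false := by
        cases hcc : d.contains u with
        | false => rfl
        | true => exact absurd ((contains_iff_mem_keys d u).mp hcc) (hcf u (by simp))
      have hcf' : ∀ w ∈ l',
          w ∉ (d.insert u (PySem.Set.diff (PySem.Set.ofList (rowA adj u)) removed)).keys := by
        intro w hw
        rw [keys_insert_fresh d u _ hfresh]
        intro hmem
        rcases List.mem_append.mp hmem with h' | h'
        · exact hcf w (List.mem_cons_of_mem _ hw) h'
        · have : w = u := by simpa using h'
          exact (List.nodup_cons.mp hnd).1 (this ▸ hw)
      rw [foldl_induced_items adj removed l' _ (List.nodup_cons.mp hnd).2 hcf']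
      rw [insert_items_fresh d u _ hfresh]
      rw [List.filterMap_cons]
      simp [hru]

theorem foldl_init_items (adj : List (List Int)) :
    ∀ (l : List Int) (d : PySem.Dict Int (PySem.Set Int)), l.Nodup →
      (∀ u ∈ l, u ∉ d.keys) →
      ((l.foldl (fun d u => d.insert u (PySem.Set.ofList ((PySem.List.pyGet? adj u).getD []))) d).items
        = d.items ++ l.map (fun u => (u, PySem.Set.ofList ((PySem.List.pyGet? adj u).getD []))))
  | [], d, _, _ => by simp
  | u :: l', d, hnd, hcf => by
    rw [List.foldl_cons]
    have hfresh : d.contains u = false := by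
      cases hcc : d.contains u with
      | false => rfl
      | true => exact absurd ((contains_iff_mem_keys d u).mp hcc) (hcf u (by simp))
    have hcf' : ∀ w ∈ l',
        w ∉ (d.insert u (PySem.Set.ofList ((PySem.List.pyGet? adj u).getD []))).keys := by
      intro w hw
      rw [keys_insert_fresh d u _ hfresh]
      intro hmem
      rcases List.mem_append.mp hmem with h' | h'
      · exact hcf w (List.mem_cons_of_mem _ hw) h'
      · have : w = u := by simpa using h'
        exact (List.nodup_cons.mp hnd).1 (this ▸ hw)
    rw [foldl_init_items adj l' _ (List.nodup_cons.mp hnd).2 hcf']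
    rw [insert_items_fresh d u _ hfresh]
    simp

-- the running-argmax over keys, as computed by Python's max(…, key=…)
def aFold (sub : PySem.Dict Int (PySem.Set Int)) (l : List Int) (m : Int) : Int :=
  l.foldl (fun mm u =>
    if PySem.Set.len (sub.getD mm []) < PySem.Set.len (sub.getD u []) then u else mm) m

theorem max?_cons_aFold (sub : PySem.Dict Int (PySem.Set Int)) :
    ∀ (ks : List Int) (k : Int),
      PySem.List.max? (k :: ks) (fun u => PySem.Set.len (sub.getD u []))
        = some (aFold sub ks k)
  | [], k => by simp [PySem.List.max?, aFold]
  | x :: t, k => by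
    have h1 : PySem.List.max? (k :: x :: t) (fun u => PySem.Set.len (sub.getD u []))
        = PySem.List.max?
            ((if PySem.Set.len (sub.getD k []) < PySem.Set.len (sub.getD x []) then x else k) :: t)
            (fun u => PySem.Set.len (sub.getD u [])) := by
      unfold PySem.List.max?
      simp only [List.foldl_cons]
      by_cases h : PySem.Set.len (sub.getD k []) < PySem.Set.len (sub.getD x [])
      · have h' : List.length (sub.getD k []) < List.length (sub.getD x []) := by
          simpa [PySem.Set.len] using h
        simp [h, h']
      · have h' : ¬ List.length (sub.getD k []) < List.length (sub.getD x []) := by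
          simpa [PySem.Set.len] using h
        simp [h, h']
    rw [h1]
    by_cases h : PySem.Set.len (sub.getD k []) < PySem.Set.len (sub.getD x [])
    · rw [if_pos h, max?_cons_aFold sub t x]
      have h' : List.length (sub.getD k []) < List.length (sub.getD x []) := by
        simpa [PySem.Set.len] using h
      simp [aFold, h']
    · rw [if_neg h, max?_cons_aFold sub t k]
      have h' : ¬ List.length (sub.getD k []) < List.length (sub.getD x []) := by
        simpa [PySem.Set.len] using h
      simp [aFold, h']

theorem bFold_eq_aFold (sub : PySem.Dict Int (PySem.Set Int)) :
    ∀ (l : List (Int × PySem.Set Int)) (m : Int),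
      (∀ p ∈ l, sub.getD p.1 [] = p.2) →
      l.foldl (fun (acc : Int × Int) pr =>
          if PySem.Set.len pr.2 > acc.2 then (pr.1, PySem.Set.len pr.2) else acc)
        (m, PySem.Set.len (sub.getD m []))
        = (aFold sub (l.map Prod.fst) m,
           PySem.Set.len (sub.getD (aFold sub (l.map Prod.fst) m) []))
  | [], m, _ => by simp [aFold]
  | (u, v) :: t, m, hget => by
    have hv : sub.getD u [] = v := hget (u, v) (by simp)
    simp only [List.foldl_cons, List.map_cons, aFold, gt_iff_lt, ← hv]
    by_cases h : PySem.Set.len (sub.getD m []) < PySem.Set.len (sub.getD u [])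
    · rw [if_pos h, if_pos h]
      exact bFold_eq_aFold sub t u (fun p hp => hget p (List.mem_cons_of_mem _ hp))
    · rw [if_neg h, if_neg h]
      exact bFold_eq_aFold sub t m (fun p hp => hget p (List.mem_cons_of_mem _ hp))

theorem argmax_eq (sub : PySem.Dict Int (PySem.Set Int))
    (hnd : sub.keys.Nodup) (hne : sub.keys ≠ []) :
    (PySem.List.max? sub.keys (fun u => PySem.Set.len (sub.getD u []))).getD (-1)
      = argmaxB sub.items := by
  have hget : ∀ p ∈ sub.items, sub.getD p.1 [] = p.2 := by
    intro p hp
    unfold PySem.Dict.getD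
    rw [get?_of_mem_nodup sub hnd hp]
    rfl
  cases hit : sub.items with
  | nil => exact absurd (by simp [PySem.Dict.keys, hit]) hne
  | cons pr t =>
    have hkeys : sub.keys = pr.1 :: t.map Prod.fst := by simp [PySem.Dict.keys, hit]
    have hv : sub.getD pr.1 [] = pr.2 := hget pr (by simp [hit])
    unfold argmaxB
    rw [hkeys, max?_cons_aFold sub (t.map Prod.fst) pr.1]
    simp only [List.foldl_cons]
    have hstep : (if PySem.Set.len pr.2 > (-1 : Int) then (pr.1, PySem.Set.len pr.2)
        else ((-1 : Int), (-1 : Int))) = (pr.1, PySem.Set.len (sub.getD pr.1 [])) := by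
      rw [if_pos (by simp only [PySem.Set.len, gt_iff_lt]; omega)]
      rw [hv]
    rw [hstep]
    rw [bFold_eq_aFold sub t pr.1 (fun p hp => hget p (by simp [hit, hp]))]
    rfl

theorem pyRange_nodup (n : Int) : (PySem.List.pyRange 0 n 1).Nodup := by
  unfold PySem.List.pyRange
  rw [if_neg (by norm_num)]
  refine List.Nodup.map ?_ List.nodup_range
  intro a b h
  simpa using h

theorem induced_items (adj : List (List Int)) (removed : PySem.Set Int) :
    (inducedSubgraph adj removed).items
      = (PySem.List.pyRange 0 (adj.length : Int) 1).filterMap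
          (fun u => if PySem.Set.contains removed u then none
                    else some (u, PySem.Set.diff (PySem.Set.ofList (rowA adj u)) removed)) := by
  unfold inducedSubgraph
  rw [foldl_induced_items adj removed _ _ (pyRange_nodup _) (by simp [PySem.Dict.keys])]
  rfl

theorem map_fst_filterMap (removed : PySem.Set Int) (val : Int → PySem.Set Int) :
    ∀ (l : List Int),
      ((l.filterMap (fun u => if PySem.Set.contains removed u then none
          else some (u, val u))).map Prod.fst)
        = l.filter (fun u => !PySem.Set.contains removed u)
  | [] => by simp
  | u :: l' => by
    rw [List.filterMap_cons, List.filter_cons]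
    cases hr : PySem.Set.contains removed u with
    | true => simpa using map_fst_filterMap removed val l'
    | false => simpa using map_fst_filterMap removed val l'

theorem keys_induced (adj : List (List Int)) (removed : PySem.Set Int) :
    (inducedSubgraph adj removed).keys
      = (PySem.List.pyRange 0 (adj.length : Int) 1).filter
          (fun u => !PySem.Set.contains removed u) := by
  unfold PySem.Dict.keys
  rw [induced_items adj removed]
  exact map_fst_filterMap removed _ _

theorem keys_induced_nodup (adj : List (List Int)) (removed : PySem.Set Int) :
    (inducedSubgraph adj removed).keys.Nodup := by
  rw [keys_induced]
  exact (pyRange_nodup _).filter _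

theorem diff_empty (s : PySem.Set Int) : PySem.Set.diff s (PySem.Set.ofList []) = s := by
  simp [PySem.Set.diff, PySem.Set.ofList, PySem.Set.empty, PySem.Set.contains]

theorem init_eq_induced (adj : List (List Int)) :
    initSubB adj = inducedSubgraph adj (PySem.Set.ofList []) := by
  apply PySem.Dict.ext
  unfold initSubB
  rw [foldl_init_items adj _ _ (pyRange_nodup _) (by simp [PySem.Dict.keys])]
  rw [induced_items adj (PySem.Set.ofList [])]
  have hc : ∀ u : Int, PySem.Set.contains (PySem.Set.ofList []) u = false := fun u => rfl
  simp only [PySem.Dict.items, hc, Bool.false_eq_true, if_false, diff_empty]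
  have hfm : ∀ l : List Int,
      l.filterMap (fun x => some (x, PySem.Set.ofList (rowA adj x)))
        = l.map (fun x => (x, PySem.Set.ofList (rowA adj x))) := by
    intro l; induction l with
    | nil => simp
    | cons a t ih => simp [ih]
  rw [hfm]
  simp [rowA]

theorem diff_add (s removed : PySem.Set Int) (b : Int) :
    PySem.Set.diff s (PySem.Set.add removed b)
      = PySem.Set.discard (PySem.Set.diff s removed) b := by
  unfold PySem.Set.diff PySem.Set.discard
  rw [List.filter_filter]
  refine List.filter_congr (fun x _ => ?_)
  rw [contains_add]
  cases hcr : PySem.Set.contains removed x <;> by_cases hxb : x = b <;> simp [hxb, hcr]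

theorem keys_erase (d : PySem.Dict Int (PySem.Set Int)) (b : Int) :
    (d.erase b).keys = d.keys.filter (fun k => !(k == b)) := by
  unfold PySem.Dict.erase PySem.Dict.keys
  induction d.items with
  | nil => simp
  | cons p t ih =>
    rw [List.filter_cons, List.map_cons, List.filter_cons]
    cases hb : (p.1 == b) <;> simpa [hb] using ih

theorem filterMap_del (adj : List (List Int)) (removed : PySem.Set Int) (b : Int) :
    ∀ (l : List Int),
      (((l.filterMap (fun u => if PySem.Set.contains removed u then none
            else some (u, PySem.Set.diff (PySem.Set.ofList (rowA adj u)) removed))).filter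
          (fun p => !(p.1 == b))).map
        (fun p => (p.1, PySem.Set.discard p.2 b)))
        = l.filterMap (fun u => if PySem.Set.contains (PySem.Set.add removed b) u then none
            else some (u, PySem.Set.diff (PySem.Set.ofList (rowA adj u))
              (PySem.Set.add removed b)))
  | [] => by simp
  | u :: l' => by
    rw [List.filterMap_cons, List.filterMap_cons]
    have hca := contains_add removed b u
    cases hr : PySem.Set.contains removed u with
    | true =>
      rw [hr] at hca
      simp only [Bool.true_or] at hca
      simp only [hr, hca, if_true]
      exact filterMap_del adj removed b l'
    | false =>
      rw [hr] at hca
      simp only [Bool.false_or] at hca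
      by_cases hub : u = b
      · have hct : PySem.Set.contains (PySem.Set.add removed b) u = true := by
          rw [hca]; simp [hub]
        simp only [hr, hct, if_true, Bool.false_eq_true, if_false]
        simp only [List.filter_cons]
        rw [if_neg (by simp [hub])]
        exact filterMap_del adj removed b l'
      · have hcf : PySem.Set.contains (PySem.Set.add removed b) u = false := by
          rw [hca]; simp [hub]
        simp only [hr, hcf, Bool.false_eq_true, if_false]
        simp only [List.filter_cons]
        rw [if_pos (by simp [hub])]
        rw [List.map_cons]
        rw [filterMap_del adj removed b l']
        rw [diff_add]

theorem delVertex_induced (adj : List (List Int)) (removed : PySem.Set Int) (b : Int) :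
    delVertexB (inducedSubgraph adj removed) b
      = inducedSubgraph adj (PySem.Set.add removed b) := by
  apply PySem.Dict.ext
  unfold delVertexB
  have hSnd : (inducedSubgraph adj removed).keys.Nodup := keys_induced_nodup adj removed
  have hend : ((inducedSubgraph adj removed).erase b).keys.Nodup := by
    rw [keys_erase]
    exact hSnd.filter _
  have heitems : ((inducedSubgraph adj removed).erase b).items
      = (inducedSubgraph adj removed).items.filter (fun p => !(p.1 == b)) := rfl
  rw [foldl_modify_all (fun s => PySem.Set.discard s b)
    ((inducedSubgraph adj removed).erase b).keys
    ((inducedSubgraph adj removed).erase b) hend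
    (fun k hk => contains_of_mem_keys _ hk) hend]
  have hmap : (((inducedSubgraph adj removed).erase b).items.map
      (fun p => if p.1 ∈ ((inducedSubgraph adj removed).erase b).keys
        then (p.1, PySem.Set.discard p.2 b) else p))
      = (((inducedSubgraph adj removed).erase b).items.map
        (fun p => (p.1, PySem.Set.discard p.2 b))) := by
    refine List.map_congr_left (fun p hp => ?_)
    have hk : p.1 ∈ ((inducedSubgraph adj removed).erase b).keys :=
      List.mem_map_of_mem (f := fun x => x.1) hp
    rw [if_pos hk]
  rw [hmap, heitems, induced_items adj removed, induced_items adj (PySem.Set.add removed b)]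
  exact filterMap_del adj removed b _

theorem len_add_fresh (s : PySem.Set Int) (x : Int) (h : PySem.Set.contains s x = false) :
    PySem.Set.len (PySem.Set.add s x) = PySem.Set.len s + 1 := by
  unfold PySem.Set.add
  rw [h]
  simp [PySem.Set.len]

theorem greedy_loops_eq (adj : List (List Int)) :
    ∀ (f : Nat) (removed : PySem.Set Int) (count : Int),
      count = PySem.Set.len removed →
      greedyLoopA adj f removed
        = greedyLoopB adj f (inducedSubgraph adj removed) count
  | 0, removed, count, hc => by simp [greedyLoopA, greedyLoopB, hc]
  | f + 1, removed, count, hc => by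
    have hCeq : hasCycleA (inducedSubgraph adj removed)
        = hasCycleB (inducedSubgraph adj removed) := hasCycle_eq _
    cases hcy : hasCycleA (inducedSubgraph adj removed) with
    | false =>
      have hcyB : hasCycleB (inducedSubgraph adj removed) = false := by
        rw [← hCeq]; exact hcy
      simp [greedyLoopA, greedyLoopB, hcy, hcyB, hc]
    | true =>
      have hcyB : hasCycleB (inducedSubgraph adj removed) = true := by
        rw [← hCeq]; exact hcy
      have hne : (inducedSubgraph adj removed).keys ≠ [] := hasCycleA_keys_ne _ hcy
      have hnd := keys_induced_nodup adj removed
      have harg := argmax_eq (inducedSubgraph adj removed) hnd hne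
      cases hmx : PySem.List.max? (inducedSubgraph adj removed).keys
          (fun u => PySem.Set.len ((inducedSubgraph adj removed).getD u [])) with
      | none => exact absurd ((PySem.List.max?_eq_none_iff _ _).mp hmx) hne
      | some m =>
        have hmem : m ∈ (inducedSubgraph adj removed).keys := PySem.List.max?_mem hmx
        have hnr : PySem.Set.contains removed m = false := by
          rw [keys_induced] at hmem
          have h2 := (List.mem_filter.mp hmem).2
          cases hcc : PySem.Set.contains removed m with
          | false => rfl
          | true => rw [hcc] at h2; simp at h2
        rw [hmx] at harg
        simp only [Option.getD_some] at harg
        simp only [greedyLoopA, greedyLoopB, hcy, hcyB, if_true]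
        rw [hmx]
        simp only [Option.getD_some]
        rw [← harg, delVertex_induced adj removed m]
        exact greedy_loops_eq adj f (PySem.Set.add removed m) (count + 1)
          (by rw [hc, len_add_fresh removed m hnr])

-- ===== VERDICT (by name: the statement is the Claim_ definition above) =====
theorem greedy_fvs_spec : Claim_equal_greedy_fvs := by
  intro adj _
  unfold Spec_greedy_fvs greedy_fvs greedy_fvs_alt
  rw [init_eq_induced]
  exact greedy_loops_eq adj (adj.length + 2) (PySem.Set.ofList []) 0 rfl
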